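-- pv_equiv track=rewrite | github.com/Xrenya/Algorithms | Leetcode/Python/_1582.py | summator
-- ===== SOURCE A (Python) =====
-- def summator(mat):
--     acc = 0
--     idx = 0
--     for i, num in enumerate(mat):
--         num = num
--         acc += num
--         if num == 1:
--             idx = i
--     return acc, idx
-- ===== SOURCE B (Python) =====
-- def summator(mat):
--     acc = sum(mat)
--     idx = 0
--     for j, num in enumerate(reversed(mat)):
--         if num == 1:
--             idx = len(mat) - 1 - j
--             break
--     return acc, idx
-- ===== Notes on version B (the rewrite author's own statement) =====
-- stated objective: simpler
-- what changed: Replaced A's single fused loop carrying (acc, idx) with the builtin sum plus a separate backward scan that breaks at the first 1 (last 1 overall), defaulting idx to 0.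
import Mathlib
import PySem

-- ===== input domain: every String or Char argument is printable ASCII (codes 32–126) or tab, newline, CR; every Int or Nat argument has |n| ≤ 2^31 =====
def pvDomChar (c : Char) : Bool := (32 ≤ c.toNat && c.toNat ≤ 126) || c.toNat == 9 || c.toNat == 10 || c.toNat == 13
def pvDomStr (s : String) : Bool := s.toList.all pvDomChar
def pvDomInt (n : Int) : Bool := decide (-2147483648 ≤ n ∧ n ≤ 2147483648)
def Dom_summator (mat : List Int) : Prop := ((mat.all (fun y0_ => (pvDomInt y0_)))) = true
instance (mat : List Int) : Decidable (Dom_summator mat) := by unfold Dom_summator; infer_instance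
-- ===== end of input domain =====

-- B replaces A's fused accumulate-and-track loop by a library sum plus a separate backward
-- scan that stops at the first 1 (objective: simpler decomposition, same cost).

-- ===== PORT A =====
-- A: one loop over enumerate(mat) carrying (acc, idx).
def summator (mat : List Int) : Int × Int :=
  (PySem.List.enumerate mat).foldl
    (fun s p => (s.1 + p.2, if p.2 = 1 then p.1 else s.2)) (0, 0)

-- ===== PORT B =====
-- B's backward loop: walks reversed(mat) carrying the forward index of the current element,
-- returns it at the first 1 (Python's `break`), 0 if none is found.
def summatorFindLastOne : List Int → Int → Int
  | [], _ => 0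
  | num :: rest, j => if num = 1 then j else summatorFindLastOne rest (j - 1)

def summator_alt (mat : List Int) : Int × Int :=
  (mat.sum, summatorFindLastOne mat.reverse ((mat.length : Int) - 1))

-- ===== PRECONDITION & SPEC =====
def Spec_summator (mat : List Int) (out : Int × Int) : Prop := out = summator_alt mat
instance (mat : List Int) (out : Int × Int) : Decidable (Spec_summator mat out) := by unfold Spec_summator; infer_instance

-- ===== CLAIM (what is proved, stated in full; the proofs are below) =====
def Claim_equal_summator : Prop := ∀ (mat : List Int), Dom_summator mat → Spec_summator mat (summator mat)

-- ===== LEMMAS AND PROOFS =====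
theorem summator_eq_alt (mat : List Int) : summator mat = summator_alt mat := by
  induction mat using List.reverseRecOn with
  | nil => rfl
  | append_singleton xs x ih =>
      simp only [summator, summator_alt, PySem.List.enumerate_append, List.foldl_append,
        List.reverse_append, List.reverse_cons, List.reverse_nil, List.nil_append,
        List.cons_append, List.sum_append, List.length_append] at *
      simp only [PySem.List.enumerate, List.foldl] at *
      rw [ih]
      refine Prod.ext ?_ ?_
      · simp
      · simp only [summatorFindLastOne, List.length_singleton]
        split
        · push_cast; ring
        · congr 1; push_cast; ring

-- ===== VERDICT (by name: the statement is the Claim_ definition above) =====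
theorem summator_spec : Claim_equal_summator := by
  intro mat _
  exact summator_eq_alt mat
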